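-- pv_equiv track=rewrite | github.com/mochimochi11010/the-red-solo-cup | app/cocktails.py | drink_matches_mixers
-- ===== SOURCE A (Python) =====
-- def drink_matches_mixers(drink, mixers):
--     # Get all ingredients from the drink recipe
--     ingredients = []
--     for n in range(1, 16):
--         ing = drink.get(f"strIngredient{n}")
--         if ing and ing.strip():
--             ingredients.append(ing.strip().lower())
--
--     # If no mixers specified, any drink matches
--     if not mixers:
--         return True
--
--     # Common ingredient aliases for better matching
--     aliases = {
--         "cola": ["coca-cola", "coke", "cola", "coca cola"],
--         "coca-cola": ["cola", "coke", "coca-cola", "coca cola"],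
--         "coke": ["cola", "coca-cola", "coke"],
--         "orange juice": ["orange juice", "oj", "orange"],
--         "lemon juice": ["lemon juice", "lemon"],
--         "lime juice": ["lime juice", "lime"],
--         "sugar": ["sugar", "sugar syrup", "syrup"],
--         "soda": ["soda water", "club soda", "soda"],
--         "tonic": ["tonic water", "tonic"],
--     }
--
--     # Check if any user mixer matches any recipe ingredient
--     for recipe_ing in ingredients:
--         for user_mixer in mixers:
--             user_mixer_clean = user_mixer.lower().strip()
--
--             # Check aliases first
--             if (user_mixer_clean in aliases.get(recipe_ing, []) or
--                 recipe_ing in aliases.get(user_mixer_clean, [])):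
--                 return True
--
--             # Check if one contains the other
--             if user_mixer_clean in recipe_ing or recipe_ing in user_mixer_clean:
--                 return True
--
--             # Check for word overlaps (like "orange" in "orange juice")
--             user_words = set(user_mixer_clean.split())
--             recipe_words = set(recipe_ing.split())
--             if user_words.intersection(recipe_words):
--                 return True
--
--     return False
-- ===== SOURCE B (Python) =====
-- def drink_matches_mixers(drink, mixers):
--     # Same value as A: the per-pair word-overlap test is hoisted into one global
--     # set intersection; only the alias/substring tests remain pairwise.
--     ingredients = [
--         ing.strip().lower()
--         for n in range(1, 16)
--         for ing in [drink.get(f"strIngredient{n}")]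
--         if ing and ing.strip()
--     ]
--
--     if not mixers:
--         return True
--
--     cleaned = [m.lower().strip() for m in mixers]
--
--     recipe_words = {w for i in ingredients for w in i.split()}
--     mixer_words = {w for c in cleaned for w in c.split()}
--     if recipe_words & mixer_words:
--         return True
--
--     return any(_alias_or_substring(i, c) for i in ingredients for c in cleaned)
--
--
-- _ALIASES = {
--     "cola": ["coca-cola", "coke", "cola", "coca cola"],
--     "coca-cola": ["cola", "coke", "coca-cola", "coca cola"],
--     "coke": ["cola", "coca-cola", "coke"],
--     "orange juice": ["orange juice", "oj", "orange"],
--     "lemon juice": ["lemon juice", "lemon"],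
--     "lime juice": ["lime juice", "lime"],
--     "sugar": ["sugar", "sugar syrup", "syrup"],
--     "soda": ["soda water", "club soda", "soda"],
--     "tonic": ["tonic water", "tonic"],
-- }
--
--
-- def _alias_or_substring(ing, c):
--     return (c in _ALIASES.get(ing, []) or ing in _ALIASES.get(c, [])
--             or c in ing or ing in c)
-- ===== Notes on version B (the rewrite author's own statement) =====
-- stated objective: alternative
-- what changed: The per-pair word-overlap set intersection is hoisted out of the nested loop into one global intersection of all recipe words with all cleaned mixer words, leaving only the alias/substring tests pairwise; mixers are cleaned once up front.
import Mathlib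
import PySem

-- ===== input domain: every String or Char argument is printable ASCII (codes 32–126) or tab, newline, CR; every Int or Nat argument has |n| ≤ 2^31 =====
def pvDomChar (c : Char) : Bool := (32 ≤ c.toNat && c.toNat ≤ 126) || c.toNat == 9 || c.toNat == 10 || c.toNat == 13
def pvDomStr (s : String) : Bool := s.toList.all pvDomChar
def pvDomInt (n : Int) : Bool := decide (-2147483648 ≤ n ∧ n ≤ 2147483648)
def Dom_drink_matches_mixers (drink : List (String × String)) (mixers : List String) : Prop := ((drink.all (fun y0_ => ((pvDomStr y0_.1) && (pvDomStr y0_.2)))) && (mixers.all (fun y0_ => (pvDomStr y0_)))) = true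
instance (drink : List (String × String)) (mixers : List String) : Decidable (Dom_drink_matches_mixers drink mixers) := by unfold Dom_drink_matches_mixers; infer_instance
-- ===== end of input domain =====

-- B hoists A's per-pair word-overlap test into one global word-set intersection; same value everywhere (objective: alternative decomposition).

-- shared constant: the alias table both Pythons write out literally
def pvAliases : PySem.Dict String (List String) := PySem.Dict.mk [
  ("cola", ["coca-cola", "coke", "cola", "coca cola"]),
  ("coca-cola", ["cola", "coke", "coca-cola", "coca cola"]),
  ("coke", ["cola", "coca-cola", "coke"]),
  ("orange juice", ["orange juice", "oj", "orange"]),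
  ("lemon juice", ["lemon juice", "lemon"]),
  ("lime juice", ["lime juice", "lime"]),
  ("sugar", ["sugar", "sugar syrup", "syrup"]),
  ("soda", ["soda water", "club soda", "soda"]),
  ("tonic", ["tonic water", "tonic"])]

-- ===== PORT A =====
def drink_matches_mixers (drink : List (String × String)) (mixers : List String) : Bool :=
  let ingredients := (PySem.List.pyRange 1 16 1).foldl (fun acc n =>
      match (PySem.Dict.mk drink).get? ("strIngredient" ++ PySem.Int.toStr n) with
      | some ing =>
          if (ing != "") && (PySem.Str.strip ing != "") then
            acc ++ [PySem.Str.lower (PySem.Str.strip ing)]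
          else acc
      | none => acc) []
  if mixers.isEmpty then true
  else
    ingredients.any (fun recipe_ing =>
      mixers.any (fun user_mixer =>
        let user_mixer_clean := PySem.Str.strip (PySem.Str.lower user_mixer)
        (((pvAliases.getD recipe_ing []).contains user_mixer_clean
            || (pvAliases.getD user_mixer_clean []).contains recipe_ing)
          || (PySem.Str.isIn user_mixer_clean recipe_ing
              || PySem.Str.isIn recipe_ing user_mixer_clean))
          || !(PySem.Set.inter (PySem.Set.ofList (PySem.Str.split₀ user_mixer_clean))
                 (PySem.Set.ofList (PySem.Str.split₀ recipe_ing))).isEmpty))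

-- ===== PORT B =====
def pvClean (m : String) : String := PySem.Str.strip (PySem.Str.lower m)

def pvAliasOrSubstring (ing c : String) : Bool :=
  (pvAliases.getD ing []).contains c || (pvAliases.getD c []).contains ing
    || PySem.Str.isIn c ing || PySem.Str.isIn ing c

def drink_matches_mixers_alt (drink : List (String × String)) (mixers : List String) : Bool :=
  let ingredients := (PySem.List.pyRange 1 16 1).filterMap (fun n =>
      match (PySem.Dict.mk drink).get? ("strIngredient" ++ PySem.Int.toStr n) with
      | some ing =>
          if (ing != "") && (PySem.Str.strip ing != "") then
            some (PySem.Str.lower (PySem.Str.strip ing))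
          else none
      | none => none)
  if mixers.isEmpty then true
  else
    let cleaned := mixers.map pvClean
    let recipeWords := PySem.Set.ofList (ingredients.flatMap (fun i => PySem.Str.split₀ i))
    let mixerWords := PySem.Set.ofList (cleaned.flatMap (fun c => PySem.Str.split₀ c))
    if !(PySem.Set.inter recipeWords mixerWords).isEmpty then true
    else ingredients.any (fun i => cleaned.any (fun c => pvAliasOrSubstring i c))

-- ===== PRECONDITION & SPEC =====
def Spec_drink_matches_mixers (drink : List (String × String)) (mixers : List String) (out : Bool) : Prop := out = drink_matches_mixers_alt drink mixers
instance (drink : List (String × String)) (mixers : List String) (out : Bool) : Decidable (Spec_drink_matches_mixers drink mixers out) := by unfold Spec_drink_matches_mixers; infer_instance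

-- ===== CLAIM (what is proved, stated in full; the proofs are below) =====
def Claim_equal_drink_matches_mixers : Prop := ∀ (drink : List (String × String)) (mixers : List String), Dom_drink_matches_mixers drink mixers → Spec_drink_matches_mixers drink mixers (drink_matches_mixers drink mixers)

-- ===== LEMMAS AND PROOFS =====

-- fold of "append the produced element, if any" is filterMap
lemma pv_foldl_opt {A B : Type} (g : A -> Option B) : forall (ns : List A) (acc : List B),
    ns.foldl (fun acc n => acc ++ (g n).toList) acc = acc ++ ns.filterMap g := by
  intro ns
  induction ns with
  | nil => intro acc; simp
  | cons n ns ih => intro acc; cases hg : g n <;> simp [hg, ih]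

-- A's append-fold over range(1,16) builds the same ingredient list as B's filterMap
lemma pv_ings_eq (drink : List (String × String)) : ∀ (ns : List Int) (acc : List String),
    ns.foldl (fun acc n =>
      match (PySem.Dict.mk drink).get? ("strIngredient" ++ PySem.Int.toStr n) with
      | some ing =>
          if (ing != "") && (PySem.Str.strip ing != "") then
            acc ++ [PySem.Str.lower (PySem.Str.strip ing)]
          else acc
      | none => acc) acc
    = acc ++ ns.filterMap (fun n =>
      match (PySem.Dict.mk drink).get? ("strIngredient" ++ PySem.Int.toStr n) with
      | some ing =>
          if (ing != "") && (PySem.Str.strip ing != "") then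
            some (PySem.Str.lower (PySem.Str.strip ing))
          else none
      | none => none) := by
  have hfun : (fun (acc : List String) (n : Int) =>
      match (PySem.Dict.mk drink).get? ("strIngredient" ++ PySem.Int.toStr n) with
      | some ing =>
          if (ing != "") && (PySem.Str.strip ing != "") then
            acc ++ [PySem.Str.lower (PySem.Str.strip ing)]
          else acc
      | none => acc)
      = fun (acc : List String) (n : Int) => acc ++ ((fun n =>
      match (PySem.Dict.mk drink).get? ("strIngredient" ++ PySem.Int.toStr n) with
      | some ing =>
          if (ing != "") && (PySem.Str.strip ing != "") then
            some (PySem.Str.lower (PySem.Str.strip ing))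
          else none
      | none => none) n).toList := by
    funext acc n
    cases hg : (PySem.Dict.mk drink).get? ("strIngredient" ++ PySem.Int.toStr n) with
    | none => simp [hg]
    | some ing =>
      by_cases h : ((ing != "") && (PySem.Str.strip ing != "")) = true <;> simp [hg, h]
  intro ns acc
  rw [hfun]
  exact pv_foldl_opt _ ns acc

-- a nonempty set-intersection of two set(xs) is exactly a shared element
lemma pv_inter_nonempty (xs ys : List String) :
    (!(PySem.Set.inter (PySem.Set.ofList xs) (PySem.Set.ofList ys)).isEmpty) = true
      ↔ ∃ w, w ∈ xs ∧ w ∈ ys := by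
  rw [Bool.not_eq_eq_eq_not, Bool.not_true, List.isEmpty_eq_false_iff_exists_mem]
  constructor
  · rintro ⟨w, hw⟩
    rw [PySem.Set.mem_inter, PySem.Set.mem_ofList, PySem.Set.mem_ofList] at hw
    exact ⟨w, hw⟩
  · rintro ⟨w, h1, h2⟩
    exact ⟨w, by rw [PySem.Set.mem_inter, PySem.Set.mem_ofList, PySem.Set.mem_ofList]; exact ⟨h1, h2⟩⟩

-- the pairwise OR of A's three tests equals B's global-intersection-then-pairwise form
set_option maxHeartbeats 1000000 in
lemma pv_body_eq (ings mixers : List String) :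
    ings.any (fun recipe_ing =>
      mixers.any (fun user_mixer =>
        let user_mixer_clean := PySem.Str.strip (PySem.Str.lower user_mixer)
        (((pvAliases.getD recipe_ing []).contains user_mixer_clean
            || (pvAliases.getD user_mixer_clean []).contains recipe_ing)
          || (PySem.Str.isIn user_mixer_clean recipe_ing
              || PySem.Str.isIn recipe_ing user_mixer_clean))
          || !(PySem.Set.inter (PySem.Set.ofList (PySem.Str.split₀ user_mixer_clean))
                 (PySem.Set.ofList (PySem.Str.split₀ recipe_ing))).isEmpty))
    = (if (!(PySem.Set.inter
              (PySem.Set.ofList (ings.flatMap (fun i => PySem.Str.split₀ i)))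
              (PySem.Set.ofList ((mixers.map pvClean).flatMap (fun c => PySem.Str.split₀ c)))).isEmpty) = true
       then true
       else ings.any (fun i => (mixers.map pvClean).any (fun c => pvAliasOrSubstring i c))) := by
  rw [Bool.eq_iff_iff]
  constructor
  · intro hL
    rw [List.any_eq_true] at hL
    obtain ⟨i, hi, hL⟩ := hL
    rw [List.any_eq_true] at hL
    obtain ⟨m, hm, hL⟩ := hL
    simp only [Bool.or_eq_true] at hL
    split_ifs with hG
    · rfl
    · rw [List.any_eq_true]
      rcases hL with hP | hW
      · refine ⟨i, hi, ?_⟩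
        rw [List.any_eq_true]
        refine ⟨pvClean m, List.mem_map_of_mem hm, ?_⟩
        simp only [pvAliasOrSubstring, Bool.or_eq_true, pvClean]
        rcases hP with hab | (h | h)
        · exact Or.inl (Or.inl hab)
        · exact Or.inl (Or.inr h)
        · exact Or.inr h
      · exfalso
        apply hG
        rw [pv_inter_nonempty] at hW
        obtain ⟨w, hw1, hw2⟩ := hW
        rw [pv_inter_nonempty]
        exact ⟨w, List.mem_flatMap.2 ⟨i, hi, hw2⟩,
               List.mem_flatMap.2 ⟨pvClean m, List.mem_map_of_mem hm, hw1⟩⟩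
  · intro hR
    split_ifs at hR with hG
    · rw [pv_inter_nonempty] at hG
      obtain ⟨w, hw1, hw2⟩ := hG
      obtain ⟨i, hi, hwi⟩ := List.mem_flatMap.1 hw1
      obtain ⟨c, hc, hwc⟩ := List.mem_flatMap.1 hw2
      obtain ⟨m, hm, rfl⟩ := List.mem_map.1 hc
      rw [List.any_eq_true]
      refine ⟨i, hi, ?_⟩
      rw [List.any_eq_true]
      refine ⟨m, hm, ?_⟩
      simp only [Bool.or_eq_true]
      right
      rw [pv_inter_nonempty]
      exact ⟨w, hwc, hwi⟩
    · rw [List.any_eq_true] at hR ⊢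
      obtain ⟨i, hi, hR⟩ := hR
      rw [List.any_eq_true] at hR
      obtain ⟨c, hc, hP⟩ := hR
      obtain ⟨m, hm, rfl⟩ := List.mem_map.1 hc
      refine ⟨i, hi, ?_⟩
      rw [List.any_eq_true]
      refine ⟨m, hm, ?_⟩
      simp only [Bool.or_eq_true]
      left
      simp only [pvAliasOrSubstring, Bool.or_eq_true, pvClean] at hP
      rcases hP with (hab | h) | h
      · exact Or.inl hab
      · exact Or.inr (Or.inl h)
      · exact Or.inr (Or.inr h)

-- ===== VERDICT (by name: the statement is the Claim_ definition above) =====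
theorem drink_matches_mixers_spec : Claim_equal_drink_matches_mixers := by
  intro drink mixers _
  show drink_matches_mixers drink mixers = drink_matches_mixers_alt drink mixers
  simp only [drink_matches_mixers, drink_matches_mixers_alt]
  rw [pv_ings_eq, List.nil_append]
  by_cases hmix : mixers.isEmpty = true
  · rw [if_pos hmix, if_pos hmix]
  · rw [if_neg hmix, if_neg hmix]
    exact pv_body_eq _ mixers
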